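-- pv_equiv track=rewrite | github.com/Kudito98/Codesignal-tasks | code-arcade/118-maximumSum/maximumSum.py | solution
-- ===== SOURCE A (Python) =====
-- def solution(a, q):
--     a.sort()
--     b = [0]*len(a)
--
--     for e in q:
--         for i in range(e[0],e[1]+1):
--             b[i] += 1
--
--     b.sort()
--     res = 0
--
--     for i in range(len(a)):
--         res += a[i]*b[i]
--     return res
-- ===== SOURCE B (Python) =====
-- def solution(a, q):
--     # Difference array for the range increments, then one prefix-sum pass.
--     # Like A, this sorts the list `a` in place (same observable mutation).
--     a.sort()
--     n = len(a)
--     d = [0] * (n + 1)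
--     for e in q:
--         lo, hi = e[0], e[1]
--         if lo <= hi:
--             d[lo] += 1
--             d[hi + 1] -= 1
--     b = []
--     c = 0
--     for i in range(n):
--         c += d[i]
--         b.append(c)
--     b.sort()
--     return sum(x * y for x, y in zip(a, b))
-- ===== Notes on version B (the rewrite author's own statement) =====
-- stated objective: faster
-- what changed: Replaces the per-index increment over every query range (cost = sum of range lengths) by a difference array with one prefix-sum pass, so each query costs O(1).
-- outside the precondition, e.g. on solution([1, 2, 3], [[-1, 1]]): A returns 6, B returns -1
import Mathlib
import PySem

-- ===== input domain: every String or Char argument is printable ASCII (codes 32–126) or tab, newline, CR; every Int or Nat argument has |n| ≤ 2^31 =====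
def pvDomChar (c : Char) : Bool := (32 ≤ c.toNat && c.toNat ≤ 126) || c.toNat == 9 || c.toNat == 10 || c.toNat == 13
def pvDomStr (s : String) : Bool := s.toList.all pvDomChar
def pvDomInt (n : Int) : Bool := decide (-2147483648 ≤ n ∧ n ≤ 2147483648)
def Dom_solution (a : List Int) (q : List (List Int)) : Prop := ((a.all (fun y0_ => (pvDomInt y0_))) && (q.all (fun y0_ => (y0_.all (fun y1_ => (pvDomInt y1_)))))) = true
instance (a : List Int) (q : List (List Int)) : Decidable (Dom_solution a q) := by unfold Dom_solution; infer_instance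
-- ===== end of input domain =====

-- B replaces per-index increments over each query range by a difference array + one
-- prefix-sum pass. Both programs sort the argument list `a` in place (same mutation);
-- the equivalence proved is about the return value.

-- ===== PORT A =====
def solution (a : List Int) (q : List (List Int)) : Int :=
  let a' := PySem.List.sorted a (fun x => x) false
  let b0 : List Int := List.replicate a'.length 0
  let b := q.foldl (fun b e =>
      (PySem.List.pyRange (PySem.List.pyGetD e 0 0) (PySem.List.pyGetD e 1 0 + 1) 1).foldl
        (fun b i => PySem.List.pySetD b i (PySem.List.pyGetD b i 0 + 1)) b) b0
  let b' := PySem.List.sorted b (fun x => x) false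
  (PySem.List.pyRange 0 (a'.length : Int) 1).foldl
    (fun res i => res + PySem.List.pyGetD a' i 0 * PySem.List.pyGetD b' i 0) 0

-- ===== PORT B =====
def solution_alt (a : List Int) (q : List (List Int)) : Int :=
  let a' := PySem.List.sorted a (fun x => x) false
  let n := a'.length
  let d := q.foldl (fun d e =>
      let lo := PySem.List.pyGetD e 0 0
      let hi := PySem.List.pyGetD e 1 0
      if lo ≤ hi then
        PySem.List.pySetD (PySem.List.pySetD d lo (PySem.List.pyGetD d lo 0 + 1))
          (hi + 1) (PySem.List.pyGetD (PySem.List.pySetD d lo (PySem.List.pyGetD d lo 0 + 1)) (hi + 1) 0 - 1)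
      else d)
    (List.replicate (n + 1) 0)
  let cb := (PySem.List.pyRange 0 (n : Int) 1).foldl
      (fun cb i => (cb.1 + PySem.List.pyGetD d i 0, cb.2 ++ [cb.1 + PySem.List.pyGetD d i 0])) ((0 : Int), ([] : List Int))
  let b' := PySem.List.sorted cb.2 (fun x => x) false
  ((a'.zip b').map (fun p => p.1 * p.2)).sum

-- ===== PRECONDITION & SPEC =====
-- Pre_ excludes queries on which A raises an IndexError (fewer than two entries, or a
-- nonempty range whose upper bound reaches len(a) or whose lower bound is below -len(a)),
-- and queries with a negative lower bound in [-len(a), 0), where A returns a value only by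
-- Python's accidental negative-index wraparound (a defensible-corner artefact neither
-- program should be required to match; see cites).
def Pre_solution (a : List Int) (q : List (List Int)) : Prop :=
  ∀ e ∈ q, 2 ≤ e.length ∧
    (e.getD 0 0 ≤ e.getD 1 0 → 0 ≤ e.getD 0 0 ∧ e.getD 1 0 + 1 ≤ (a.length : Int))
instance (a : List Int) (q : List (List Int)) : Decidable (Pre_solution a q) := by
  unfold Pre_solution; infer_instance
def pvWitness_solution : List Int × List (List Int) := ([3, 1, 2], [[0, 1], [2, 2], [1, 0]])
def Spec_solution (a : List Int) (q : List (List Int)) (out : Int) : Prop := out = solution_alt a q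
instance (a : List Int) (q : List (List Int)) (out : Int) : Decidable (Spec_solution a q out) := by unfold Spec_solution; infer_instance

-- ===== CLAIM (what is proved, stated in full; the proofs are below) =====
def Claim_equal_solution : Prop := ∀ (a : List Int) (q : List (List Int)), Dom_solution a q → Pre_solution a q → Spec_solution a q (solution a q)

-- ===== LEMMAS AND PROOFS =====

-- helpers used only by the proofs
def pvCnt (q : List (List Int)) (i : Int) : Int :=
  ((q.countP (fun e => decide (PySem.List.pyGetD e 0 0 ≤ i ∧ i ≤ PySem.List.pyGetD e 1 0)) : Nat) : Int)
def pvDl (q : List (List Int)) (i : Int) : Int :=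
  ((q.countP (fun e => decide (PySem.List.pyGetD e 0 0 ≤ PySem.List.pyGetD e 1 0 ∧ PySem.List.pyGetD e 0 0 = i)) : Nat) : Int)
def pvDr (q : List (List Int)) (i : Int) : Int :=
  ((q.countP (fun e => decide (PySem.List.pyGetD e 0 0 ≤ PySem.List.pyGetD e 1 0 ∧ PySem.List.pyGetD e 1 0 + 1 = i)) : Nat) : Int)
def pvS (d : List Int) (m : Nat) : Int := ((List.range m).map (fun (j : Nat) => d.getD j 0)).sum

theorem pvGetD0_eq (e : List Int) : PySem.List.pyGetD e 0 0 = e.getD 0 0 :=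
  PySem.List.pyGetD_zero e 0

theorem pvGetD1_eq (e : List Int) : PySem.List.pyGetD e 1 0 = e.getD 1 0 :=
  PySem.List.pyGetD_natCast e 1 0

theorem pvGetD_set (b : List Int) (k j : Nat) (v : Int) (hk : k < b.length) :
    (b.set k v).getD j 0 = if j = k then v else b.getD j 0 := by
  by_cases h : j = k
  · subst h; simp [List.getD, hk]
  · simp [List.getD, Ne.symm h, h]

theorem pvGetD_replicate (m j : Nat) : (List.replicate m (0 : Int)).getD j 0 = 0 := by
  by_cases h : j < m
  · simp [List.getD, h]
  · simp [List.getD, h]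

-- inner loop of A: increment every index of range(lo, hi+1)
theorem pvIncr (n : Nat) : ∀ (lo hi : Int) (b : List Int), n = (hi + 1 - lo).toNat →
    0 ≤ lo → hi < (b.length : Int) →
    ((PySem.List.pyRange lo (hi + 1) 1).foldl
        (fun b i => PySem.List.pySetD b i (PySem.List.pyGetD b i 0 + 1)) b).length = b.length ∧
    ∀ j : Nat, ((PySem.List.pyRange lo (hi + 1) 1).foldl
        (fun b i => PySem.List.pySetD b i (PySem.List.pyGetD b i 0 + 1)) b).getD j 0
      = b.getD j 0 + (if lo ≤ (j : Int) ∧ (j : Int) ≤ hi then 1 else 0) := by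
  induction n with
  | zero =>
    intro lo hi b hn h0 hlen
    have hnil : PySem.List.pyRange lo (hi + 1) 1 = [] :=
      PySem.List.pyRange_one_eq_nil (by omega)
    rw [hnil]
    refine ⟨rfl, fun j => ?_⟩
    have : ¬ (lo ≤ (j : Int) ∧ (j : Int) ≤ hi) := by omega
    simp [this]
  | succ n ih =>
    intro lo hi b hn h0 hlen
    have hlt : lo < hi + 1 := by omega
    rw [PySem.List.pyRange_one_cons hlt]
    simp only [List.foldl_cons]
    have hlolen : lo < (b.length : Int) := by omega
    have hb1eq : PySem.List.pySetD b lo (PySem.List.pyGetD b lo 0 + 1)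
        = b.set lo.toNat (b.getD lo.toNat 0 + 1) := by
      rw [PySem.List.pySetD_of_nonneg b _ h0,
        PySem.List.pyGetD_eq_getElem b 0 h0 hlolen, List.getD_eq_getElem b 0 (by omega)]
    rw [hb1eq]
    have hlen1 : (b.set lo.toNat (b.getD lo.toNat 0 + 1)).length = b.length := by simp
    obtain ⟨hL, hG⟩ := ih (lo + 1) hi (b.set lo.toNat (b.getD lo.toNat 0 + 1))
      (by omega) (by omega) (by rw [hlen1]; omega)
    refine ⟨by rw [hL, hlen1], fun j => ?_⟩
    rw [hG j, pvGetD_set b _ j _ (by omega)]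
    by_cases hj : j = lo.toNat
    · have h1 : lo ≤ (j : Int) ∧ (j : Int) ≤ hi := by omega
      have h2 : ¬ (lo + 1 ≤ (j : Int) ∧ (j : Int) ≤ hi) := by omega
      rw [if_pos hj, if_neg h2, if_pos h1, hj]
      ring
    · have h2 : (lo + 1 ≤ (j : Int) ∧ (j : Int) ≤ hi) ↔ (lo ≤ (j : Int) ∧ (j : Int) ≤ hi) := by
        omega
      rw [if_neg hj]
      simp only [h2]

-- outer loop of A over the queries
theorem pvAfold (q : List (List Int)) : ∀ (b : List Int),
    (∀ e ∈ q, PySem.List.pyGetD e 0 0 ≤ PySem.List.pyGetD e 1 0 →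
      0 ≤ PySem.List.pyGetD e 0 0 ∧ PySem.List.pyGetD e 1 0 < (b.length : Int)) →
    (q.foldl (fun b e =>
        (PySem.List.pyRange (PySem.List.pyGetD e 0 0) (PySem.List.pyGetD e 1 0 + 1) 1).foldl
          (fun b i => PySem.List.pySetD b i (PySem.List.pyGetD b i 0 + 1)) b) b).length = b.length ∧
    ∀ j : Nat, (q.foldl (fun b e =>
        (PySem.List.pyRange (PySem.List.pyGetD e 0 0) (PySem.List.pyGetD e 1 0 + 1) 1).foldl
          (fun b i => PySem.List.pySetD b i (PySem.List.pyGetD b i 0 + 1)) b) b).getD j 0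
      = b.getD j 0 + pvCnt q (j : Int) := by
  induction q with
  | nil => intro b _; exact ⟨rfl, fun j => by simp [pvCnt]⟩
  | cons e q ih =>
    intro b hpre
    simp only [List.foldl_cons]
    by_cases hact : PySem.List.pyGetD e 0 0 ≤ PySem.List.pyGetD e 1 0
    · obtain ⟨h0, hlen⟩ := hpre e List.mem_cons_self hact
      obtain ⟨hL, hG⟩ := pvIncr (PySem.List.pyGetD e 1 0 + 1 - PySem.List.pyGetD e 0 0).toNat
        (PySem.List.pyGetD e 0 0) (PySem.List.pyGetD e 1 0) b rfl h0 hlen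
      obtain ⟨hL2, hG2⟩ := ih _ (fun x hx hax => by
        rw [hL]; exact hpre x (List.mem_cons_of_mem _ hx) hax)
      refine ⟨by rw [hL2, hL], fun j => ?_⟩
      rw [hG2 j, hG j]
      simp only [pvCnt, List.countP_cons, decide_eq_true_eq]
      split_ifs with h <;> omega
    · have hnil : PySem.List.pyRange (PySem.List.pyGetD e 0 0) (PySem.List.pyGetD e 1 0 + 1) 1 = [] :=
        PySem.List.pyRange_one_eq_nil (by omega)
      rw [hnil]
      simp only [List.foldl_nil]
      obtain ⟨hL2, hG2⟩ := ih b (fun x hx hax => hpre x (List.mem_cons_of_mem _ hx) hax)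
      refine ⟨hL2, fun j => ?_⟩
      rw [hG2 j]
      simp only [pvCnt, List.countP_cons, decide_eq_true_eq]
      have h : ¬ (PySem.List.pyGetD e 0 0 ≤ (j:Int) ∧ (j:Int) ≤ PySem.List.pyGetD e 1 0) := by
        omega
      rw [if_neg h]
      omega

-- outer loop of B over the queries (difference array)
theorem pvBfold (q : List (List Int)) : ∀ (d : List Int),
    (∀ e ∈ q, PySem.List.pyGetD e 0 0 ≤ PySem.List.pyGetD e 1 0 →
      0 ≤ PySem.List.pyGetD e 0 0 ∧ PySem.List.pyGetD e 1 0 + 1 < (d.length : Int)) →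
    (q.foldl (fun d e =>
        let lo := PySem.List.pyGetD e 0 0
        let hi := PySem.List.pyGetD e 1 0
        if lo ≤ hi then
          PySem.List.pySetD (PySem.List.pySetD d lo (PySem.List.pyGetD d lo 0 + 1))
            (hi + 1) (PySem.List.pyGetD (PySem.List.pySetD d lo (PySem.List.pyGetD d lo 0 + 1)) (hi + 1) 0 - 1)
        else d) d).length = d.length ∧
    ∀ j : Nat, (q.foldl (fun d e =>
        let lo := PySem.List.pyGetD e 0 0
        let hi := PySem.List.pyGetD e 1 0
        if lo ≤ hi then
          PySem.List.pySetD (PySem.List.pySetD d lo (PySem.List.pyGetD d lo 0 + 1))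
            (hi + 1) (PySem.List.pyGetD (PySem.List.pySetD d lo (PySem.List.pyGetD d lo 0 + 1)) (hi + 1) 0 - 1)
        else d) d).getD j 0
      = d.getD j 0 + pvDl q (j : Int) - pvDr q (j : Int) := by
  induction q with
  | nil => intro d _; exact ⟨rfl, fun j => by simp [pvDl, pvDr]⟩
  | cons e q ih =>
    intro d hpre
    simp only [List.foldl_cons]
    by_cases hact : PySem.List.pyGetD e 0 0 ≤ PySem.List.pyGetD e 1 0
    · obtain ⟨h0, hlen⟩ := hpre e List.mem_cons_self hact
      rw [if_pos hact]
      have hb1eq : PySem.List.pySetD d (PySem.List.pyGetD e 0 0)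
            (PySem.List.pyGetD d (PySem.List.pyGetD e 0 0) 0 + 1)
          = d.set (PySem.List.pyGetD e 0 0).toNat
              (d.getD (PySem.List.pyGetD e 0 0).toNat 0 + 1) := by
        rw [PySem.List.pySetD_of_nonneg d _ h0,
          PySem.List.pyGetD_eq_getElem d 0 h0 (by omega), List.getD_eq_getElem d 0 (by omega)]
      rw [hb1eq]
      set d1 := d.set (PySem.List.pyGetD e 0 0).toNat
        (d.getD (PySem.List.pyGetD e 0 0).toNat 0 + 1) with hd1
      have hlen1 : d1.length = d.length := by rw [hd1]; simp
      have hb2eq : PySem.List.pySetD d1 (PySem.List.pyGetD e 1 0 + 1)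
            (PySem.List.pyGetD d1 (PySem.List.pyGetD e 1 0 + 1) 0 - 1)
          = d1.set (PySem.List.pyGetD e 1 0 + 1).toNat
              (d1.getD (PySem.List.pyGetD e 1 0 + 1).toNat 0 - 1) := by
        rw [PySem.List.pySetD_of_nonneg d1 _ (by omega),
          PySem.List.pyGetD_eq_getElem d1 0 (by omega) (by rw [hlen1]; omega),
          List.getD_eq_getElem d1 _ (by rw [hlen1]; omega)]
      rw [hb2eq]
      set d2 := d1.set (PySem.List.pyGetD e 1 0 + 1).toNat
        (d1.getD (PySem.List.pyGetD e 1 0 + 1).toNat 0 - 1) with hd2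
      have hlen2 : d2.length = d.length := by rw [hd2]; simp [hlen1]
      have hg2 : ∀ j : Nat, d2.getD j 0 = d.getD j 0
          + (if (j:Int) = PySem.List.pyGetD e 0 0 then 1 else 0)
          - (if (j:Int) = PySem.List.pyGetD e 1 0 + 1 then 1 else 0) := by
        intro j
        rw [hd2, pvGetD_set d1 _ j _ (by rw [hlen1]; omega), hd1,
          pvGetD_set d _ j _ (by omega), pvGetD_set d _ _ _ (by omega)]
        by_cases hj1 : j = (PySem.List.pyGetD e 1 0 + 1).toNat
        · have ha : (j : Int) = PySem.List.pyGetD e 1 0 + 1 := by omega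
          have hne : ¬ ((PySem.List.pyGetD e 1 0 + 1).toNat = (PySem.List.pyGetD e 0 0).toNat) := by
            omega
          have hne2 : ¬ ((j : Int) = PySem.List.pyGetD e 0 0) := by omega
          rw [if_pos hj1, if_neg hne, if_neg hne2, if_pos ha, ← hj1]
          ring
        · have h1 : ¬ ((j : Int) = PySem.List.pyGetD e 1 0 + 1) := by omega
          rw [if_neg hj1, if_neg h1]
          by_cases hj2 : j = (PySem.List.pyGetD e 0 0).toNat
          · have ha : (j : Int) = PySem.List.pyGetD e 0 0 := by omega
            rw [if_pos hj2, if_pos ha, hj2]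
            ring
          · have ha : ¬ ((j : Int) = PySem.List.pyGetD e 0 0) := by omega
            rw [if_neg hj2, if_neg ha]
            ring
      obtain ⟨hL2, hG2⟩ := ih d2 (fun x hx hax => by
        rw [hlen2]; exact hpre x (List.mem_cons_of_mem _ hx) hax)
      refine ⟨by rw [hL2, hlen2], fun j => ?_⟩
      rw [hG2 j, hg2 j]
      simp only [pvDl, pvDr, List.countP_cons, decide_eq_true_eq]
      split_ifs <;> omega
    · rw [if_neg hact]
      obtain ⟨hL2, hG2⟩ := ih d (fun x hx hax => hpre x (List.mem_cons_of_mem _ hx) hax)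
      refine ⟨hL2, fun j => ?_⟩
      rw [hG2 j]
      simp only [pvDl, pvDr, List.countP_cons, decide_eq_true_eq]
      split_ifs <;> omega

-- the prefix-sum scan of B
theorem pvScan (d : List Int) (n : Nat) :
    ((List.range n).foldl
        (fun cb k => (cb.1 + d.getD k 0, cb.2 ++ [cb.1 + d.getD k 0])) ((0 : Int), ([] : List Int)))
      = (pvS d n, (List.range n).map (fun i => pvS d (i + 1))) := by
  induction n with
  | zero => simp [pvS]
  | succ n ih =>
    rw [List.range_succ, List.foldl_append, ih]
    have h1 : pvS d (n + 1) = pvS d n + d.getD n 0 := by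
      simp [pvS, List.range_succ]
    simp only [List.foldl_cons, List.foldl_nil, List.map_append, List.map_cons, List.map_nil, h1]

-- sum of a point indicator over range m
theorem pvIndSum (t : Int) (m : Nat) :
    ((List.range m).map (fun (j : Nat) => if (j : Int) = t then (1 : Int) else 0)).sum
      = if 0 ≤ t ∧ t < (m : Int) then 1 else 0 := by
  induction m with
  | zero =>
    simp only [List.range_zero, List.map_nil, List.sum_nil]
    have : ¬ (0 ≤ t ∧ t < ((0 : Nat) : Int)) := by omega
    rw [if_neg this]
  | succ m ih =>
    rw [List.range_succ, List.map_append, List.sum_append, ih]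
    simp only [List.map_cons, List.map_nil, List.sum_cons, List.sum_nil]
    split_ifs <;> omega

-- pointwise sum decomposition
theorem pvMapSum3 (l : List Nat) (a b c : Nat → Int) :
    (l.map (fun (j : Nat) => a j + (b j - c j))).sum
      = (l.map a).sum + ((l.map b).sum - (l.map c).sum) := by
  induction l with
  | nil => simp
  | cons x xs ih => simp only [List.map_cons, List.sum_cons, ih]; ring

-- prefix sums of the difference array are the coverage counts
theorem pvPrefixCnt (q : List (List Int))
    (hq : ∀ e ∈ q, PySem.List.pyGetD e 0 0 ≤ PySem.List.pyGetD e 1 0 → 0 ≤ PySem.List.pyGetD e 0 0)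
    (i : Nat) :
    ((List.range (i + 1)).map (fun (j : Nat) => pvDl q (j : Int) - pvDr q (j : Int))).sum
      = pvCnt q (i : Int) := by
  induction q with
  | nil => simp [pvDl, pvDr, pvCnt]
  | cons e q ih =>
    have hq' : ∀ x ∈ q, PySem.List.pyGetD x 0 0 ≤ PySem.List.pyGetD x 1 0 →
        0 ≤ PySem.List.pyGetD x 0 0 := fun x hx => hq x (List.mem_cons_of_mem _ hx)
    have hd : ∀ j : Nat, pvDl (e :: q) (j : Int) - pvDr (e :: q) (j : Int)
        = (pvDl q (j : Int) - pvDr q (j : Int))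
          + ((if (j : Int) = PySem.List.pyGetD e 0 0 ∧ PySem.List.pyGetD e 0 0 ≤ PySem.List.pyGetD e 1 0 then (1:Int) else 0)
            - (if (j : Int) = PySem.List.pyGetD e 1 0 + 1 ∧ PySem.List.pyGetD e 0 0 ≤ PySem.List.pyGetD e 1 0 then (1:Int) else 0)) := by
      intro j
      simp only [pvDl, pvDr, List.countP_cons, decide_eq_true_eq]
      split_ifs <;> omega
    calc ((List.range (i + 1)).map (fun (j : Nat) => pvDl (e :: q) (j : Int) - pvDr (e :: q) (j : Int))).sum
        = ((List.range (i + 1)).map (fun (j : Nat) => (pvDl q (j : Int) - pvDr q (j : Int))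
            + ((if (j : Int) = PySem.List.pyGetD e 0 0 ∧ PySem.List.pyGetD e 0 0 ≤ PySem.List.pyGetD e 1 0 then (1:Int) else 0)
              - (if (j : Int) = PySem.List.pyGetD e 1 0 + 1 ∧ PySem.List.pyGetD e 0 0 ≤ PySem.List.pyGetD e 1 0 then (1:Int) else 0)))).sum := by
          exact congrArg List.sum (List.map_congr_left (fun j _ => hd j))
      _ = ((List.range (i + 1)).map (fun (j : Nat) => pvDl q (j : Int) - pvDr q (j : Int))).sum
            + (((List.range (i + 1)).map (fun (j : Nat) => if (j : Int) = PySem.List.pyGetD e 0 0 ∧ PySem.List.pyGetD e 0 0 ≤ PySem.List.pyGetD e 1 0 then (1:Int) else 0)).sum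
              - ((List.range (i + 1)).map (fun (j : Nat) => if (j : Int) = PySem.List.pyGetD e 1 0 + 1 ∧ PySem.List.pyGetD e 0 0 ≤ PySem.List.pyGetD e 1 0 then (1:Int) else 0)).sum) :=
          pvMapSum3 _ _ _ _
      _ = pvCnt (e :: q) (i : Int) := by
          rw [ih hq']
          by_cases hact : PySem.List.pyGetD e 0 0 ≤ PySem.List.pyGetD e 1 0
          · have h0 : 0 ≤ PySem.List.pyGetD e 0 0 := hq e List.mem_cons_self hact
            have e1 : ∀ j : Nat, (if (j : Int) = PySem.List.pyGetD e 0 0 ∧ PySem.List.pyGetD e 0 0 ≤ PySem.List.pyGetD e 1 0 then (1:Int) else 0)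
                = (if (j : Int) = PySem.List.pyGetD e 0 0 then (1:Int) else 0) := by
              intro j; split_ifs <;> simp_all
            have e2 : ∀ j : Nat, (if (j : Int) = PySem.List.pyGetD e 1 0 + 1 ∧ PySem.List.pyGetD e 0 0 ≤ PySem.List.pyGetD e 1 0 then (1:Int) else 0)
                = (if (j : Int) = PySem.List.pyGetD e 1 0 + 1 then (1:Int) else 0) := by
              intro j; split_ifs <;> simp_all
            rw [List.map_congr_left (fun j _ => e1 j), List.map_congr_left (fun j _ => e2 j),
              pvIndSum, pvIndSum]
            simp only [pvCnt, List.countP_cons, decide_eq_true_eq]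
            split_ifs <;> omega
          · have e1 : ∀ j : Nat, (if (j : Int) = PySem.List.pyGetD e 0 0 ∧ PySem.List.pyGetD e 0 0 ≤ PySem.List.pyGetD e 1 0 then (1:Int) else 0)
                = 0 := by intro j; split_ifs <;> simp_all
            have e2 : ∀ j : Nat, (if (j : Int) = PySem.List.pyGetD e 1 0 + 1 ∧ PySem.List.pyGetD e 0 0 ≤ PySem.List.pyGetD e 1 0 then (1:Int) else 0)
                = 0 := by intro j; split_ifs <;> simp_all
            rw [List.map_congr_left (fun j _ => e1 j), List.map_congr_left (fun j _ => e2 j)]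
            simp only [pvCnt, List.countP_cons, decide_eq_true_eq]
            have h : ¬ (PySem.List.pyGetD e 0 0 ≤ (i:Int) ∧ (i:Int) ≤ PySem.List.pyGetD e 1 0) := by
              omega
            rw [if_neg h]
            simp

-- dot product as a fold over indices equals the zip-map-sum form
theorem pvDot (x : List Int) : ∀ (y : List Int), y.length = x.length →
    ((List.range x.length).map (fun k => x.getD k 0 * y.getD k 0)).sum
      = ((x.zip y).map (fun p => p.1 * p.2)).sum := by
  induction x with
  | nil => intro y _; simp
  | cons x0 xs ih =>
    intro y hy
    cases y with
    | nil => simp at hy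
    | cons y0 ys =>
      simp only [List.length_cons, List.range_succ_eq_map, List.map_cons, List.map_map,
        List.sum_cons, List.zip_cons_cons]
      have h : ((List.range xs.length).map ((fun k => (x0 :: xs).getD k 0 * (y0 :: ys).getD k 0) ∘ Nat.succ)).sum
          = ((List.range xs.length).map (fun k => xs.getD k 0 * ys.getD k 0)).sum := by
        refine congrArg List.sum (List.map_congr_left (fun k _ => ?_))
        simp
      rw [h, ih ys (by simpa using hy)]
      simp

-- ===== VERDICT (by name: the statement is the Claim_ definition above) =====
theorem solution_spec : Claim_equal_solution := by
  intro a q hdom hpre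
  unfold Spec_solution
  have hpre' : ∀ e ∈ q, PySem.List.pyGetD e 0 0 ≤ PySem.List.pyGetD e 1 0 →
      0 ≤ PySem.List.pyGetD e 0 0 ∧ PySem.List.pyGetD e 1 0 < (a.length : Int) := by
    intro e he hle
    rw [pvGetD0_eq, pvGetD1_eq] at hle ⊢
    have := (hpre e he).2 hle
    omega
  simp only [solution, solution_alt]
  set s := PySem.List.sorted a (fun x => x) false with hs
  have hsl : s.length = a.length := PySem.List.length_sorted a _ _
  -- A-side count list
  obtain ⟨hLA, hGA⟩ := pvAfold q (List.replicate s.length (0:Int)) (by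
    intro e he hle
    obtain ⟨h1, h2⟩ := hpre' e he hle
    refine ⟨h1, by simpa [hsl] using h2⟩)
  set bA := q.foldl (fun b e =>
      (PySem.List.pyRange (PySem.List.pyGetD e 0 0) (PySem.List.pyGetD e 1 0 + 1) 1).foldl
        (fun b i => PySem.List.pySetD b i (PySem.List.pyGetD b i 0 + 1)) b)
      (List.replicate s.length (0:Int)) with hbA
  have hALen : bA.length = s.length := by
    rw [hbA]; exact hLA.trans (by simp)
  have hbAeq : bA = (List.range s.length).map (fun (k : Nat) => pvCnt q (k : Int)) := by
    apply List.ext_getElem (by simp [hALen])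
    intro k h1 h2
    rw [← List.getD_eq_getElem bA 0 h1, hbA, hGA k, pvGetD_replicate]
    simp
  -- B-side difference array
  obtain ⟨hLB, hGB⟩ := pvBfold q (List.replicate (s.length + 1) (0:Int)) (by
    intro e he hle
    obtain ⟨h1, h2⟩ := hpre' e he hle
    refine ⟨h1, by simp only [List.length_replicate]; push_cast; omega⟩)
  set dB := q.foldl (fun d e =>
      let lo := PySem.List.pyGetD e 0 0
      let hi := PySem.List.pyGetD e 1 0
      if lo ≤ hi then
        PySem.List.pySetD (PySem.List.pySetD d lo (PySem.List.pyGetD d lo 0 + 1))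
          (hi + 1) (PySem.List.pyGetD (PySem.List.pySetD d lo (PySem.List.pyGetD d lo 0 + 1)) (hi + 1) 0 - 1)
      else d)
      (List.replicate (s.length + 1) (0:Int)) with hdB
  -- turn the three pyRange loops into List.range folds
  rw [PySem.List.pyRange_zero_nat]
  simp only [List.foldl_map, PySem.List.pyGetD_natCast]
  rw [pvScan dB s.length]
  have hbBeq : (List.range s.length).map (fun (i : Nat) => pvS dB (i + 1))
      = (List.range s.length).map (fun (k : Nat) => pvCnt q (k : Int)) := by
    apply List.map_congr_left
    intro i hi
    have hstep : ∀ j ∈ List.range (i + 1), dB.getD j 0 = pvDl q (j : Int) - pvDr q (j : Int) := by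
      intro j hj
      rw [hdB, hGB j, pvGetD_replicate]
      ring
    have hmc := List.map_congr_left (l := List.range (i + 1))
      (f := fun (j : Nat) => dB.getD j 0)
      (g := fun (j : Nat) => pvDl q (j : Int) - pvDr q (j : Int)) hstep
    rw [pvS, hmc]
    exact pvPrefixCnt q (fun e he hle => (hpre' e he hle).1) i
  simp only [hbAeq, hbBeq]
  set b' := PySem.List.sorted ((List.range s.length).map (fun (k : Nat) => pvCnt q (k : Int)))
    (fun x => x) false with hb'
  have hb'len : b'.length = s.length := by
    rw [hb']; rw [PySem.List.length_sorted]; simp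
  rw [PySem.List.foldl_add (List.range s.length) (fun k => s.getD k 0 * b'.getD k 0) 0]
  rw [← hb'len] at hALen ⊢
  rw [show (List.range b'.length) = List.range s.length from by rw [hb'len]]
  have := pvDot s b' (by rw [hb'len])
  rw [← this]
  simp
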